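-- pv_equiv track=rewrite | github.com/pypi-data/pypi-mirror-340 | packages/aqi-hub/aqi_hub-0.2.1-py3-none-any.whl/aqi_hub/aqi_cn/aqi.py | cal_primary_pollutant
-- ===== SOURCE A (Python) =====
-- from typing import Dict, List, Optional, Tuple, Union
--
-- def cal_primary_pollutant(iaqi: Dict[str, int]) -> List[str]:
--     """计算首要污染物
--
--     首要污染物是指 IAQI 值大于 50 且最大的污染物。如果有多个污染物的 IAQI 值相同且最大，
--     则这些污染物都是首要污染物。
--
--     Args:
--         iaqi: IAQI 值字典，键为污染物名称，值为 IAQI 值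
--
--     Returns:
--         List[str]: 首要污染物列表。如果没有首要污染物，返回空列表
--     """
--     if not isinstance(iaqi, dict):
--         raise TypeError("iaqi must be a dictionary")
--     primary_pollutant = []
--     valid_values = {k: v for k, v in iaqi.items() if v is not None}
--     if not valid_values:
--         return primary_pollutant
--     max_iaqi = max(valid_values.values())
--     for item, value in valid_values.items():
--         if value > 50 and value == max_iaqi:
--             primary_pollutant.append(item)
--     return primary_pollutant
-- ===== SOURCE B (Python) =====
-- def cal_primary_pollutant(iaqi):
--     if not isinstance(iaqi, dict):
--         raise TypeError("iaqi must be a dictionary")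
--     best = None
--     result = []
--     for item, value in iaqi.items():
--         if value is None:
--             continue
--         if best is None or value > best:
--             best = value
--             result = [item]
--         elif value == best:
--             result.append(item)
--     if best is not None and best > 50:
--         return result
--     return []
-- ===== Notes on version B (the rewrite author's own statement) =====
-- stated objective: alternative
-- what changed: Replaces the build-a-filtered-dict / take-max / second-filter-pass structure by a single pass over iaqi.items() that maintains a running best value and the list of keys achieving it, applying the >50 test only once at the end.
import Mathlib
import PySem

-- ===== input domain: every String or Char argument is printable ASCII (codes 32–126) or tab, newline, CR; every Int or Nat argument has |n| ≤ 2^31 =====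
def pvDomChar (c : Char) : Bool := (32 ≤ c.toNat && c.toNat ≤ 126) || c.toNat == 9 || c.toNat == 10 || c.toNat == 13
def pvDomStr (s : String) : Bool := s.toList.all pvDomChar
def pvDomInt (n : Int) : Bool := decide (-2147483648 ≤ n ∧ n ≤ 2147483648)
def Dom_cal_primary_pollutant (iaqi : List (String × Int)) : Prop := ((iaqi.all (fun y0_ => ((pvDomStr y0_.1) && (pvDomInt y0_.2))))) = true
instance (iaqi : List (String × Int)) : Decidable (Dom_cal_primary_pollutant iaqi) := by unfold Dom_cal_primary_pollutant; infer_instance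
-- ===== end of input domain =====

-- B replaces A's max-then-filter two-pass structure by a single running-max pass; same return value (no speed claim).
-- Both ports read the argument as the items of a Python dict built from the association list (duplicate keys: last value wins, first position kept).
-- The Python 'v is not None' filter and the isinstance guard are vacuous for the dict[str,int] signature and have no counterpart here.

-- ===== PORT A =====
def cal_primary_pollutant (iaqi : List (String × Int)) : List String :=
  let valid := (PySem.Dict.ofList iaqi).items
  match PySem.List.max? (valid.map (·.2)) (fun v => v) with
  | none => []     -- 'if not valid_values: return primary_pollutant'
  | some m => valid.foldl (fun acc p => if p.2 > 50 ∧ p.2 = m then acc ++ [p.1] else acc) []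

-- ===== PORT B =====
def cal_primary_pollutant_alt (iaqi : List (String × Int)) : List String :=
  let st := (PySem.Dict.ofList iaqi).items.foldl
    (fun (st : Option Int × List String) p =>
      match st.1 with
      | none => (some p.2, [p.1])
      | some b =>
        if p.2 > b then (some p.2, [p.1])
        else if p.2 = b then (st.1, st.2 ++ [p.1])
        else st)
    (none, [])
  match st with
  | (some b, res) => if b > 50 then res else []
  | (none, _) => []

-- ===== PRECONDITION & SPEC =====
def Spec_cal_primary_pollutant (iaqi : List (String × Int)) (out : List String) : Prop := out = cal_primary_pollutant_alt iaqi
instance (iaqi : List (String × Int)) (out : List String) : Decidable (Spec_cal_primary_pollutant iaqi out) := by unfold Spec_cal_primary_pollutant; infer_instance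

-- ===== CLAIM (what is proved, stated in full; the proofs are below) =====
def Claim_equal_cal_primary_pollutant : Prop := ∀ (iaqi : List (String × Int)), Dom_cal_primary_pollutant iaqi → Spec_cal_primary_pollutant iaqi (cal_primary_pollutant iaqi)

-- ===== LEMMAS AND PROOFS =====

-- B's loop step
def ppStep (st : Option Int × List String) (p : String × Int) : Option Int × List String :=
  match st.1 with
  | none => (some p.2, [p.1])
  | some b =>
    if p.2 > b then (some p.2, [p.1])
    else if p.2 = b then (st.1, st.2 ++ [p.1])
    else st

-- running max of the values of t starting from b
def ppMax (t : List (String × Int)) (b : Int) : Int := t.foldl (fun a p => max a p.2) b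

lemma ppMax_ge (t : List (String × Int)) (b : Int) : b ≤ ppMax t b := by
  induction t generalizing b with
  | nil => simp [ppMax]
  | cons q t ih =>
    simp only [ppMax, List.foldl_cons] at *
    exact le_trans (le_max_left b q.2) (ih (max b q.2))

lemma ppFold_char (t : List (String × Int)) (b : Int) (r : List String) :
    t.foldl ppStep (some b, r)
      = (some (ppMax t b),
         (if b = ppMax t b then r else []) ++ (t.filter (fun p => p.2 = ppMax t b)).map (·.1)) := by
  induction t generalizing b r with
  | nil => simp [ppMax]
  | cons q t ih =>
    simp only [List.foldl_cons, ppStep]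
    rcases lt_trichotomy b q.2 with h | h | h
    · have hmax : ppMax (q :: t) b = ppMax t q.2 := by
        simp [ppMax, max_eq_right h.le]
      have hge := ppMax_ge t q.2
      rw [if_pos h, ih, hmax, if_neg (by omega : ¬ b = ppMax t q.2)]
      simp only [List.filter_cons, List.nil_append]
      by_cases hq : q.2 = ppMax t q.2
      · simp [← hq]
      · simp [hq]
    · have hmax : ppMax (q :: t) b = ppMax t b := by
        simp [ppMax, max_eq_left h.ge]
      rw [if_neg (by omega : ¬ q.2 > b), if_pos h.symm, ih, hmax]
      simp only [List.filter_cons]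
      by_cases hb : b = ppMax t b
      · simp [← hb, ← h]
      · have hq : ¬ q.2 = ppMax t b := by omega
        simp [hb, hq]
    · have hmax : ppMax (q :: t) b = ppMax t b := by
        simp [ppMax, max_eq_left h.le]
      have hge := ppMax_ge t b
      rw [if_neg (by omega : ¬ q.2 > b), if_neg (by omega : ¬ q.2 = b), ih, hmax]
      simp only [List.filter_cons]
      have hq : ¬ q.2 = ppMax t b := by omega
      simp [hq]

-- A's accumulation loop collects the first components of the matching pairs
lemma ppFoldA (M : Int) (l : List (String × Int)) (acc : List String) :
    l.foldl (fun acc p => if p.2 > 50 ∧ p.2 = M then acc ++ [p.1] else acc) acc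
      = acc ++ (l.filter (fun p => decide (p.2 > 50 ∧ p.2 = M))).map (·.1) := by
  induction l generalizing acc with
  | nil => simp
  | cons q t ih =>
    simp only [List.foldl_cons, List.filter_cons]
    by_cases h2 : q.2 = M
    · by_cases h1 : q.2 > 50
      · rw [if_pos ⟨h1, h2⟩, ih]
        simp [h2, h2 ▸ h1]
      · rw [if_neg (by tauto), ih]
        simp [h2, show ¬(50:Int) < M from h2 ▸ h1]
    · rw [if_neg (by tauto), ih]
      simp [h2]

lemma pp_main (l : List (String × Int)) :
    (match PySem.List.max? (l.map (·.2)) (fun v => v) with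
     | none => []
     | some m => l.foldl (fun acc p => if p.2 > 50 ∧ p.2 = m then acc ++ [p.1] else acc) [])
    = (match l.foldl ppStep (none, []) with
       | (some b, res) => if b > 50 then res else []
       | (none, _) => ([] : List String)) := by
  cases l with
  | nil => simp [PySem.List.max?]
  | cons q t =>
    have hmax : PySem.List.max? ((q :: t).map (·.2)) (fun v => v)
        = some (ppMax t q.2) := by
      rw [List.map_cons, PySem.List.max?_id_cons]
      simp [ppMax, List.foldl_map]
    have hfold : (q :: t).foldl ppStep (none, [])
        = (some (ppMax t q.2),
           (if q.2 = ppMax t q.2 then [q.1] else []) ++ (t.filter (fun p => p.2 = ppMax t q.2)).map (·.1)) := by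
      simp only [List.foldl_cons, ppStep, ppFold_char]
    rw [hmax, hfold]
    set M := ppMax t q.2 with hM
    show (q :: t).foldl (fun acc p => if p.2 > 50 ∧ p.2 = M then acc ++ [p.1] else acc) []
        = if M > 50 then (if q.2 = M then [q.1] else []) ++ (t.filter (fun p => decide (p.2 = M))).map (·.1) else []
    rw [ppFoldA]
    by_cases h50 : M > 50
    · rw [if_pos h50]
      have heq : ∀ p : String × Int, p ∈ (q :: t) →
          (decide (p.2 > 50 ∧ p.2 = M)) = (decide (p.2 = M)) := by
        intro p _
        by_cases hp : p.2 = M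
        · simp [hp]; omega
        · simp [hp]
      rw [List.filter_congr heq]
      simp only [List.filter_cons, List.nil_append]
      by_cases hq : q.2 = M <;> simp [hq]
    · rw [if_neg h50]
      have heq : ∀ p : String × Int, p ∈ (q :: t) →
          (decide (p.2 > 50 ∧ p.2 = M)) = false := by
        intro p _
        by_cases hp : p.2 = M
        · simp [hp]; omega
        · simp [hp]
      rw [List.filter_congr heq]
      simp

-- ===== VERDICT (by name: the statement is the Claim_ definition above) =====
theorem cal_primary_pollutant_spec : Claim_equal_cal_primary_pollutant := by
  intro iaqi _
  unfold Spec_cal_primary_pollutant cal_primary_pollutant cal_primary_pollutant_alt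
  exact pp_main ((PySem.Dict.ofList iaqi).items)
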